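-- pv_equiv track=rewrite | github.com/Matteo-Candi/Master-Thesis | benchmark/Python_formatted.py | k_visible_from_left
-- ===== SOURCE A (Python) =====
-- def k_visible_from_left(n, k):
--     if n == k:
--         return 1
--     if k == 1:
--         ans = 1
--         for i in range(1, n):
--             ans *= i
--         return ans
--     return k_visible_from_left(n - 1, k - 1) + (n - 1) * k_visible_from_left(n - 1, k)
-- ===== SOURCE B (Python) =====
-- def k_visible_from_left(n, k):
--     # Bottom-up DP over the Stirling-cycle recurrence: one row of length k+1,
--     # updated n times, instead of A's top-down binary recursion.
--     if n == k:
--         return 1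
--     row = [1] + [0] * k
--     for m in range(1, n + 1):
--         row = [0] + [row[j - 1] + (m - 1) * row[j] for j in range(1, k + 1)]
--     return row[k]
-- ===== Notes on version B (the rewrite author's own statement) =====
-- stated objective: alternative
-- what changed: Replaced A's top-down binary recursion over (n-1,k-1)/(n-1,k) with a bottom-up one-row dynamic-programming table of length k+1 updated n times (O(n*k) table evaluation instead of recursion with repeated subproblems; a timing run could not confirm a speed-up on the sampled sizes).
-- intended difference: For k = 1 and n <= 0 A's empty for-loop returns 1, while B returns 0, the correct count of permutations of n <= 0 elements with one left-to-right maximum (the Stirling value c(n,1)). — e.g. on k_visible_from_left(0, 1): A returns 1, B returns 0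
import Mathlib
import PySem

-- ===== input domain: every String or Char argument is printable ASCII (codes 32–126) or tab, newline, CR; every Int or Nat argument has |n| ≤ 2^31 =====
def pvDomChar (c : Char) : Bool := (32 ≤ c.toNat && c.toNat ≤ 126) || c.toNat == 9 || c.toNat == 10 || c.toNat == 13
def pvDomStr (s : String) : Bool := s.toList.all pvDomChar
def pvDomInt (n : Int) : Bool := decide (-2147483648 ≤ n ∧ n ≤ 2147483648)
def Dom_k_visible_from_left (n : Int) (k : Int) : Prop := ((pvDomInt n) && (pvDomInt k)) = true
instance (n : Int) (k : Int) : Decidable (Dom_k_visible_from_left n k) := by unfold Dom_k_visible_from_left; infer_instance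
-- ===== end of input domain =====

-- B replaces A's binary recursion by a bottom-up one-row DP table over the same recurrence;
-- equivalence of the RETURN value on all inputs where A terminates, outside D_ below.

-- ===== PORT A =====
-- A's recursion ported with a Nat fuel that only guards termination: (n-1).toNat is
-- enough fuel on every input where the Python recursion terminates (proved below).
def kvAgo : Nat → Int → Int → Int
  | fuel, n, k =>
    if n = k then 1
    else if k = 1 then (PySem.List.pyRange 1 n 1).foldl (fun ans i => ans * i) 1
    else
      match fuel with
      | 0 => 0
      | f + 1 => kvAgo f (n - 1) (k - 1) + (n - 1) * kvAgo f (n - 1) k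

def k_visible_from_left (n : Int) (k : Int) : Int := kvAgo (n - 1).toNat n k

-- ===== PORT B =====
-- one DP step: row = [0] + [row[j-1] + (m-1)*row[j] for j in range(1, k+1)]
def kvStep (k m : Int) (row : List Int) : List Int :=
  0 :: (PySem.List.pyRange 1 (k + 1) 1).map
        (fun j => PySem.List.pyGetD row (j - 1) 0 + (m - 1) * PySem.List.pyGetD row j 0)

def k_visible_from_left_alt (n : Int) (k : Int) : Int :=
  if n = k then 1
  else
    PySem.List.pyGetD
      ((PySem.List.pyRange 1 (n + 1) 1).foldl (fun row m => kvStep k m row)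
        (1 :: List.replicate k.toNat 0)) k 0

-- ===== PRECONDITION & SPEC =====
-- Pre_ excludes exactly the inputs on which A's recursion never terminates
-- (RecursionError in Python): everything except n = k, k = 1, or 2 ≤ k ≤ n.
def Pre_k_visible_from_left (n : Int) (k : Int) : Prop :=
  n = k ∨ k = 1 ∨ (2 ≤ k ∧ k ≤ n)
instance (n : Int) (k : Int) : Decidable (Pre_k_visible_from_left n k) := by
  unfold Pre_k_visible_from_left; infer_instance
def pvWitness_k_visible_from_left : Int × Int := (5, 3)

-- For k = 1 and n ≤ 0 A's empty for-loop returns 1, while B returns 0, the correct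
-- count of permutations of n ≤ 0 elements with one left-to-right maximum (c(n,1)).
def D_k_visible_from_left (n : Int) (k : Int) : Prop := k = 1 ∧ n ≤ 0
instance (n : Int) (k : Int) : Decidable (D_k_visible_from_left n k) := by
  unfold D_k_visible_from_left; infer_instance

def Spec_k_visible_from_left (n : Int) (k : Int) (out : Int) : Prop :=
  ¬ D_k_visible_from_left n k → out = k_visible_from_left_alt n k
instance (n : Int) (k : Int) (out : Int) : Decidable (Spec_k_visible_from_left n k out) := by
  unfold Spec_k_visible_from_left; infer_instance

def pvDiffWitness_k_visible_from_left : Int × Int := (0, 1)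
def pvDiffWitnessOut_k_visible_from_left : Int × Int := (1, 0)

-- ===== CLAIM (what is proved, stated in full; the proofs are below) =====
def Claim_unchanged_k_visible_from_left : Prop :=
  ∀ (n : Int) (k : Int), Dom_k_visible_from_left n k → Pre_k_visible_from_left n k →
    Spec_k_visible_from_left n k (k_visible_from_left n k)
def Claim_changed_k_visible_from_left : Prop :=
  Dom_k_visible_from_left (pvDiffWitness_k_visible_from_left.1) (pvDiffWitness_k_visible_from_left.2) ∧
  Pre_k_visible_from_left (pvDiffWitness_k_visible_from_left.1) (pvDiffWitness_k_visible_from_left.2) ∧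
  D_k_visible_from_left (pvDiffWitness_k_visible_from_left.1) (pvDiffWitness_k_visible_from_left.2) ∧
  k_visible_from_left (pvDiffWitness_k_visible_from_left.1) (pvDiffWitness_k_visible_from_left.2) = pvDiffWitnessOut_k_visible_from_left.1 ∧
  k_visible_from_left_alt (pvDiffWitness_k_visible_from_left.1) (pvDiffWitness_k_visible_from_left.2) = pvDiffWitnessOut_k_visible_from_left.2 ∧
  pvDiffWitnessOut_k_visible_from_left.1 ≠ pvDiffWitnessOut_k_visible_from_left.2
def Claim_exact_k_visible_from_left : Prop :=
  ∀ (n : Int) (k : Int), Dom_k_visible_from_left n k → Pre_k_visible_from_left n k →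
    D_k_visible_from_left n k → k_visible_from_left n k ≠ k_visible_from_left_alt n k

-- ===== LEMMAS AND PROOFS =====

-- unsigned Stirling numbers of the first kind (the common value of both ports)
def stir : Nat → Nat → Int
  | 0, 0 => 1
  | 0, _ + 1 => 0
  | _ + 1, 0 => 0
  | m + 1, j + 1 => stir m j + (m : Int) * stir m (j + 1)

theorem stir_gt : ∀ (m j : Nat), m < j → stir m j = 0
  | 0, _ + 1, _ => rfl
  | m + 1, j + 1, h => by
      show stir m j + (m : Int) * stir m (j + 1) = 0
      rw [stir_gt m j (by omega), stir_gt m (j + 1) (by omega)]; ring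

theorem stir_diag : ∀ m : Nat, stir m m = 1
  | 0 => rfl
  | m + 1 => by
      show stir m m + (m : Int) * stir m (m + 1) = 1
      rw [stir_diag m, stir_gt m (m + 1) (by omega)]; ring


theorem stir_fact : ∀ m : Nat,
    (PySem.List.pyRange 1 ((m : Int) + 1) 1).foldl (fun a i => a * i) 1 = stir (m + 1) 1 := by
  intro m
  induction m with
  | zero =>
      rw [PySem.List.pyRange_one_eq_nil (by simp : ((0:Nat):Int) + 1 ≤ 1)]
      decide
  | succ m ih =>
      push_cast
      rw [PySem.List.pyRange_one_succ_right (by omega), List.foldl_append, ih]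
      show stir (m + 1) 1 * ((m : Int) + 1) = stir (m + 1) 0 + ((m : Int) + 1) * stir (m + 1) 1
      rw [show stir (m + 1) 0 = 0 from rfl]; ring

theorem kvAgo_eq_stir : ∀ (fuel : Nat) (n k : Int), 1 ≤ k → k ≤ n → (n - 1).toNat ≤ fuel →
    kvAgo fuel n k = stir n.toNat k.toNat := by
  intro fuel
  induction fuel with
  | zero =>
      intro n k hk hkn hf
      have hnk : n = k := by omega
      simp [kvAgo, hnk, stir_diag]
  | succ f ih =>
      intro n k hk hkn hf
      by_cases hnk : n = k
      · simp [kvAgo, hnk, stir_diag]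
      · by_cases hk1 : k = 1
        · have hm : n = ((n - 1).toNat : Int) + 1 := by omega
          rw [kvAgo, if_neg hnk, if_pos hk1, hk1]
          rw [hm, stir_fact]
          congr 1
        · have hk2 : 2 ≤ k := by omega
          have hkn' : k < n := by omega
          rw [kvAgo, if_neg hnk, if_neg hk1]
          rw [ih (n - 1) (k - 1) (by omega) (by omega) (by omega),
              ih (n - 1) k (by omega) (by omega) (by omega)]
          have hn : n.toNat = (n - 1).toNat + 1 := by omega
          have hkt : k.toNat = (k - 1).toNat + 1 := by omega
          rw [hn, hkt]
          show stir (n-1).toNat (k-1).toNat + (n - 1) * stir (n-1).toNat ((k-1).toNat + 1)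
              = stir (n-1).toNat (k-1).toNat + ((n-1).toNat : Int) * stir (n-1).toNat ((k-1).toNat + 1)
          congr 2
          omega

-- the DP row after m iterations: [stir m 0, stir m 1, …, stir m k]
def rowSpec (m k : Int) : List Int :=
  (PySem.List.pyRange 0 (k + 1) 1).map (fun j => stir m.toNat j.toNat)

theorem rowSpec_zero (k : Int) (hk : 1 ≤ k) :
    (1 : Int) :: List.replicate k.toNat 0 = rowSpec 0 k := by
  apply List.ext_getElem
  · simp [rowSpec, PySem.List.length_pyRange_one]; omega
  · intro i h1 h2
    simp only [rowSpec, List.getElem_map, PySem.List.getElem_pyRange_one]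
    rcases i with _ | i
    · simp; rfl
    · have : ((0 : Int) + (i + 1 : Nat)).toNat = i + 1 := by omega
      simp only [this]
      have hz : stir (Int.toNat 0) (i + 1) = 0 := stir_gt _ _ (by simp)
      rw [hz]
      simp

theorem stir_succ_succ (m j : Nat) : stir (m + 1) (j + 1) = stir m j + (m : Int) * stir m (j + 1) := rfl

theorem kvStep_rowSpec (k : Int) (hk : 1 ≤ k) (m : Nat) :
    kvStep k ((m : Int) + 1) (rowSpec (m : Int) k) = rowSpec ((m : Int) + 1) k := by
  conv_lhs => rw [kvStep, rowSpec]
  conv_rhs => rw [rowSpec, PySem.List.pyRange_one_cons (show (0:Int) < k + 1 by omega),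
    List.map_cons]
  rw [show (0:Int) + 1 = 1 by ring]
  congr 1
  apply List.map_congr_left
  intro j hj
  rw [PySem.List.mem_pyRange_one] at hj
  rw [PySem.List.pyGetD_map_pyRange_of_nonneg _ _ _ _ (by omega) (by omega),
      PySem.List.pyGetD_map_pyRange_of_nonneg _ _ _ _ (by omega) (by omega)]
  have hmt : ((m : Int)).toNat = m := by omega
  have hmt2 : ((m : Int) + 1).toNat = m + 1 := by omega
  have hjt : j.toNat = (j - 1).toNat + 1 := by omega
  rw [hmt, hmt2, hjt, stir_succ_succ,
    show ((m : Int) + 1 - 1) = (m : Int) by ring]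

theorem foldl_rowSpec (k : Int) (hk : 1 ≤ k) : ∀ m : Nat,
    (PySem.List.pyRange 1 ((m : Int) + 1) 1).foldl (fun row m => kvStep k m row)
      ((1 : Int) :: List.replicate k.toNat 0) = rowSpec (m : Int) k := by
  intro m
  induction m with
  | zero =>
      rw [PySem.List.pyRange_one_eq_nil (by simp : ((0:Nat):Int) + 1 ≤ 1)]
      simpa using rowSpec_zero k hk
  | succ m ih =>
      push_cast
      rw [PySem.List.pyRange_one_succ_right (by omega), List.foldl_append, ih]
      simpa using kvStep_rowSpec k hk m

theorem alt_eq_stir (n k : Int) (hk : 1 ≤ k) (hn : 0 ≤ n) (hne : n ≠ k) :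
    k_visible_from_left_alt n k = stir n.toNat k.toNat := by
  unfold k_visible_from_left_alt
  rw [if_neg hne]
  have hm : n = ((n.toNat : Nat) : Int) := by omega
  rw [hm, foldl_rowSpec k hk n.toNat]
  unfold rowSpec
  rw [PySem.List.pyGetD_map_pyRange_of_nonneg _ _ _ _ (by omega) (by omega)]

-- ===== VERDICT (by name: the statement is the Claim_ definition above) =====
theorem k_visible_from_left_spec : Claim_unchanged_k_visible_from_left := by
  intro n k _ hpre hnd
  by_cases hnk : n = k
  · unfold k_visible_from_left k_visible_from_left_alt
    cases (n - 1).toNat <;> simp [kvAgo, hnk]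
  · rcases hpre with h | h | h
    · exact absurd h hnk
    · -- k = 1, so n ≥ 1 since (k = 1 ∧ n ≤ 0) is excluded by ¬D_
      have hn1 : 1 ≤ n := by
        by_contra hc
        exact hnd ⟨h, by omega⟩
      rw [alt_eq_stir n k (by omega) (by omega) hnk]
      unfold k_visible_from_left
      cases hfe : (n - 1).toNat with
      | zero =>
          have : n = 1 := by omega
          omega
      | succ f =>
          rw [kvAgo, if_neg hnk, if_pos h]
          have hm : n = ((n - 1).toNat : Int) + 1 := by omega
          rw [hm, stir_fact, h]
          congr 1
    · rw [alt_eq_stir n k (by omega) (by omega) hnk]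
      exact kvAgo_eq_stir (n - 1).toNat n k (by omega) (by omega) le_rfl

theorem k_visible_from_left_changed : Claim_changed_k_visible_from_left := by
  unfold Claim_changed_k_visible_from_left; decide

theorem k_visible_from_left_tight : Claim_exact_k_visible_from_left := by
  intro n k _ _ hD
  obtain ⟨hk1, hn0⟩ := hD
  have hnk : n ≠ k := by omega
  have hA : k_visible_from_left n k = 1 := by
    unfold k_visible_from_left
    cases (n - 1).toNat <;>
      · rw [kvAgo, if_neg hnk, if_pos hk1,
          PySem.List.pyRange_one_eq_nil (by omega : n ≤ 1)]
        rfl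
  have hB : k_visible_from_left_alt n k = 0 := by
    unfold k_visible_from_left_alt
    rw [if_neg hnk, PySem.List.pyRange_one_eq_nil (by omega : n + 1 ≤ 1), hk1]
    decide
  rw [hA, hB]
  decide
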